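-- pv_equiv track=rewrite | github.com/pypi-data/pypi-mirror-357 | packages/stpstone/stpstone-2.0.29.tar.gz/stpstone-2.0.29/stpstone/utils/parsers/dicts.py | pair_headers_with_data
-- ===== SOURCE A (Python) =====
-- from typing import Any, Callable, Dict, List, Optional, Union
--
-- def pair_headers_with_data(
--     list_headers: List[str], list_data: List[Any]
-- ) -> List[Dict[str, Any]]:
--     """
--     DOCSTRING: PAIR HEADERS AND DATA AS KEYS AND VALUES IN A SERIALIZED LIST
--         - FOR EXAMPLE, IF LIST_HEADERS IS ['NAME', 'AGE'] AND LIST_DATA IS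
--             ['JOHN', 25, 'ALICE', 30], THE FUNCTION WILL RETURN [{'NAME': 'JOHN', 'AGE': 25},
--             {'NAME': 'ALICE', 'AGE': 30}]
--     INPUTS: LIST HEADERS, LIST DATA
--     OUTPUTS: LIST
--     """
--     # setting variables
--     list_ser = list()
--     # ensuring the list_data length is a multiple of list_headers length
--     if len(list_data) % len(list_headers) != 0:
--         raise ValueError(
--             "The length of list_data is not a multiple of the length of list_headers."
--         )
--     # iterate over the list_data in chunks equal to the length of list_headers
--     for i in range(0, len(list_data), len(list_headers)):
--         # create a dictionary for each chunk
--         entry = {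
--             list_headers[j]: list_data[i + j] for j in range(len(list_headers))
--         }
--         list_ser.append(entry)
--     # returning list of dictionaries
--     return list_ser
-- ===== SOURCE B (Python) =====
-- from typing import Any, Dict, List
--
--
-- def pair_headers_with_data(
--     list_headers: List[str], list_data: List[Any]
-- ) -> List[Dict[str, Any]]:
--     # same multiplicity guard as the original (also raises ZeroDivisionError on empty headers)
--     if len(list_data) % len(list_headers) != 0:
--         raise ValueError(
--             "The length of list_data is not a multiple of the length of list_headers."
--         )
--     # consume the data as an iterator in groups of len(list_headers)
--     groups = zip(*[iter(list_data)] * len(list_headers))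
--     return [dict(zip(list_headers, chunk)) for chunk in groups]
-- ===== Notes on version B (the rewrite author's own statement) =====
-- stated objective: idiomatic
-- what changed: Replaces the positional-offset indexing loop (range with stride plus an index-arithmetic dict comprehension) by iterator-based grouping: zip over a repeated iterator yields the chunks and each dict is built with dict(zip(headers, chunk)).
import Mathlib
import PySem

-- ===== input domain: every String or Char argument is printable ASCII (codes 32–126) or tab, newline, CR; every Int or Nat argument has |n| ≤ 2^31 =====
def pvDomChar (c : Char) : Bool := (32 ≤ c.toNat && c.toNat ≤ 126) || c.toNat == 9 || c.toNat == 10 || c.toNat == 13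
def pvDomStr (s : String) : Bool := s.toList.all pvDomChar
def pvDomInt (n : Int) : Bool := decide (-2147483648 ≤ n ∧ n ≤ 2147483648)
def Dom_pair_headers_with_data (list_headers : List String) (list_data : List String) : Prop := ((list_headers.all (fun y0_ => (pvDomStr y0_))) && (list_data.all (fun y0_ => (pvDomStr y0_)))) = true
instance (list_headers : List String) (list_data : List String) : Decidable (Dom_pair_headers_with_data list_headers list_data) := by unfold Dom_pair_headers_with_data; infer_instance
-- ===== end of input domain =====

-- B replaces A's stride-indexed loop with iterator-style grouping (chunks + dict(zip)); idiomatic, same cost.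

-- ===== PORT A =====
-- literal port of A: guard (mod? none = ZeroDivisionError, nonzero remainder = ValueError,
-- both excluded by Pre_), then a foldl over range(0, len(data), len(headers)) building each
-- dict by a foldl over range(len(headers)) with index arithmetic; pyGetD's default "" is
-- never read under Pre_ (all indices are in range).
def pair_headers_with_data (list_headers : List String) (list_data : List String) : List (List (String × String)) :=
  match PySem.Int.mod? (list_data.length : Int) (list_headers.length : Int) with
  | none => []
  | some r =>
    if r ≠ 0 then []
    else
      (PySem.List.pyRange 0 (list_data.length : Int) (list_headers.length : Int)).foldl
        (fun acc i =>
          acc ++ [((PySem.List.pyRange 0 (list_headers.length : Int) 1).foldl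
            (fun e j => PySem.Dict.insert e (PySem.List.pyGetD list_headers j "")
                          (PySem.List.pyGetD list_data (i + j) ""))
            PySem.Dict.empty).items])
        []

-- ===== PORT B =====
-- consecutive chunks of size k (k = 0 unreachable under Pre_: the guard raises first)
def pvChunks : Nat → List String → List (List String)
  | _, [] => []
  | 0, _ :: _ => []
  | k + 1, d :: ds => (d :: ds).take (k + 1) :: pvChunks (k + 1) ((d :: ds).drop (k + 1))
  termination_by _ ds => ds.length
  decreasing_by simp

-- literal port of B: same guard, then map dict(zip(headers, chunk)) over the chunk groups
def pair_headers_with_data_alt (list_headers : List String) (list_data : List String) : List (List (String × String)) :=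
  match PySem.Int.mod? (list_data.length : Int) (list_headers.length : Int) with
  | none => []
  | some r =>
    if r ≠ 0 then []
    else
      (pvChunks list_headers.length list_data).map
        (fun chunk =>
          ((list_headers.zip chunk).foldl
            (fun e p => PySem.Dict.insert e p.1 p.2) PySem.Dict.empty).items)

-- ===== PRECONDITION & SPEC =====
-- Pre_ excludes exactly the inputs where A raises: empty headers (ZeroDivisionError) and a
-- data length that is not a multiple of the header length (ValueError).
def Pre_pair_headers_with_data (list_headers : List String) (list_data : List String) : Prop :=
  list_headers ≠ [] ∧ list_data.length % list_headers.length = 0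
instance (list_headers : List String) (list_data : List String) : Decidable (Pre_pair_headers_with_data list_headers list_data) := by unfold Pre_pair_headers_with_data; infer_instance

def pvWitness_pair_headers_with_data : List String × List String :=
  (["NAME", "AGE"], ["JOHN", "25", "ALICE", "30"])

def Spec_pair_headers_with_data (list_headers : List String) (list_data : List String) (out : List (List (String × String))) : Prop := out = pair_headers_with_data_alt list_headers list_data
instance (list_headers : List String) (list_data : List String) (out : List (List (String × String))) : Decidable (Spec_pair_headers_with_data list_headers list_data out) := by unfold Spec_pair_headers_with_data; infer_instance

-- ===== CLAIM (what is proved, stated in full; the proofs are below) =====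
def Claim_equal_pair_headers_with_data : Prop := ∀ (list_headers : List String) (list_data : List String), Dom_pair_headers_with_data list_headers list_data → Pre_pair_headers_with_data list_headers list_data → Spec_pair_headers_with_data list_headers list_data (pair_headers_with_data list_headers list_data)

-- ===== LEMMAS AND PROOFS =====

-- A's inner index fold equals B's fold over the zip with the chunk, whenever the chunk covers
-- all header indices.
theorem pv_inner_eq (hs chunk : List String) (h : hs.length ≤ chunk.length)
    (acc : PySem.Dict String String) :
    (List.range hs.length).foldl
      (fun e j => PySem.Dict.insert e (hs.getD j "") (chunk.getD j "")) acc
    = (hs.zip chunk).foldl (fun e p => PySem.Dict.insert e p.1 p.2) acc := by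
  induction hs generalizing chunk acc with
  | nil => simp
  | cons h0 t ih =>
    cases chunk with
    | nil => simp at h
    | cons c cs =>
      simp only [List.length_cons, List.range_succ_eq_map, List.foldl_cons, List.foldl_map,
        List.getD_cons_zero, List.getD_cons_succ, List.zip_cons_cons]
      exact ih cs (by simpa using h) _

-- A's entry at offset i equals B's dict of the chunk starting at i.
theorem pv_entry_eq (hs ds : List String) (i : Nat) (hle : i + hs.length ≤ ds.length) :
    (PySem.List.pyRange 0 (hs.length : Int) 1).foldl
      (fun e j => PySem.Dict.insert e (PySem.List.pyGetD hs j "")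
                    (PySem.List.pyGetD ds ((i : Int) + j) "")) PySem.Dict.empty
    = (hs.zip ((ds.drop i).take hs.length)).foldl
        (fun e p => PySem.Dict.insert e p.1 p.2) PySem.Dict.empty := by
  rw [PySem.List.pyRange_zero_nat, List.foldl_map]
  rw [← pv_inner_eq hs ((ds.drop i).take hs.length) (by simp; omega)]
  apply PySem.List.foldl_congr_mem
  intro e j hj
  have hj' : j < hs.length := List.mem_range.mp hj
  rw [PySem.List.pyGetD_of_nonneg hs "" (by positivity),
      PySem.List.pyGetD_of_nonneg ds "" (by positivity)]
  have ht : ((i : Int) + (j : Int)).toNat = i + j := by omega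
  simp only [Int.toNat_natCast, ht]
  simp only [List.getD_eq_getElem?_getD]
  rw [List.getElem?_take_of_lt hj', List.getElem?_drop]

-- the outer stride range is the multiples of K
theorem pv_outer_range (K m : Nat) (hK : 0 < K) :
    PySem.List.pyRange 0 ((m * K : Nat) : Int) (K : Int)
    = (List.range m).map (fun k => ((K * k : Nat) : Int)) := by
  rw [PySem.List.pyRange_of_pos 0 _ (by exact_mod_cast hK)]
  rcases Nat.eq_zero_or_pos m with hm | hm
  · subst hm; simp
  · have hlt : (0 : Int) < ((m * K : Nat) : Int) := by positivity
    have : ((((m * K : Nat) : Int) - 0 + (K : Int) - 1) / (K : Int)).toNat = m := by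
      have h1 : (((m * K : Nat) : Int) - 0 + (K : Int) - 1) = ((K - 1 : Nat) : Int) + (m : Int) * (K : Int) := by
        push_cast [Nat.cast_sub hK]; ring
      rw [h1, Int.add_mul_ediv_right _ _ (by exact_mod_cast hK.ne' : (K : Int) ≠ 0)]
      have : ((K - 1 : Nat) : Int) / (K : Int) = 0 :=
        Int.ediv_eq_zero_of_lt (by positivity) (by exact_mod_cast Nat.sub_lt hK one_pos)
      omega
    rw [if_pos hlt, this]
    apply List.map_congr_left
    intro k _
    push_cast; ring

-- the chunked map equals the map over chunk start offsets
theorem pv_chunks_eq (K : Nat) (hK : 0 < K)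
    (f : List String → List (String × String)) :
    ∀ (m : Nat) (ds : List String), ds.length = m * K →
    (List.range m).map (fun k => f ((ds.drop (K * k)).take K))
    = (pvChunks K ds).map f := by
  intro m
  induction m with
  | zero =>
    intro ds hlen
    have : ds = [] := List.eq_nil_of_length_eq_zero (by simpa using hlen)
    subst this
    obtain ⟨k, rfl⟩ := Nat.exists_eq_succ_of_ne_zero hK.ne'
    rw [pvChunks]
    simp
  | succ m ih =>
    intro ds hlen
    have hne : ds ≠ [] := by
      intro h; subst h; simp at hlen; omega
    obtain ⟨d, ds', rfl⟩ := List.exists_cons_of_ne_nil hne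
    obtain ⟨k, rfl⟩ := Nat.exists_eq_succ_of_ne_zero hK.ne'
    simp only [Nat.succ_eq_add_one] at ih hlen
    rw [pvChunks]
    rw [List.range_succ_eq_map, List.map_cons, List.map_map]
    congr 1
    simp only [Nat.succ_eq_add_one, List.drop_succ_cons]
    rw [← ih (List.drop k ds')
          (by simp only [List.length_drop]
              simp only [List.length_cons] at hlen
              have h2 : (m + 1) * (k + 1) = m * (k + 1) + (k + 1) := by ring
              omega)]
    apply List.map_congr_left
    intro j _
    simp only [Function.comp_apply, Nat.succ_eq_add_one]
    have h3 : (k + 1) * (j + 1) = ((k + 1) * j + k) + 1 := by ring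
    rw [h3, List.drop_succ_cons, List.drop_drop, Nat.add_comm ((k + 1) * j) k]

-- ===== VERDICT (by name: the statement is the Claim_ definition above) =====
theorem pair_headers_with_data_spec : Claim_equal_pair_headers_with_data := by
  intro hs ds _ hpre
  obtain ⟨hne, hmod⟩ := hpre
  have hKpos : 0 < hs.length := List.length_pos_of_ne_nil hne
  obtain ⟨m, hm⟩ : ∃ m, ds.length = m * hs.length :=
    ⟨ds.length / hs.length, (Nat.div_mul_cancel (Nat.dvd_of_mod_eq_zero hmod)).symm⟩
  unfold Spec_pair_headers_with_data pair_headers_with_data pair_headers_with_data_alt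
  have hmodInt : PySem.Int.mod? (ds.length : Int) (hs.length : Int) = some 0 := by
    rw [PySem.Int.mod?_eq_some_zero_iff_dvd (by exact_mod_cast hKpos.ne')]
    exact_mod_cast Int.natCast_dvd_natCast.mpr ⟨m, by rw [hm, Nat.mul_comm]⟩
  rw [hmodInt]
  simp only [ne_eq, not_true_eq_false, if_neg, not_false_eq_true]
  rw [PySem.List.foldl_append_singleton_eq_map, List.nil_append]
  rw [hm, pv_outer_range hs.length m hKpos, List.map_map]
  rw [← pv_chunks_eq hs.length hKpos _ m ds hm]
  apply List.map_congr_left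
  intro k hk
  have hk' : k < m := List.mem_range.mp hk
  simp only [Function.comp]
  congr 1
  exact pv_entry_eq hs ds (hs.length * k) (by
    have : hs.length * k + hs.length = (k + 1) * hs.length := by ring
    rw [hm, this]
    exact Nat.mul_le_mul_right _ hk')
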